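-- pv_equiv track=rewrite | github.com/adek1990/home-assistant-jablotron100 | check_jablotron_bytes.py | format_user_number
-- ===== SOURCE A (Python) =====
-- def format_user_number(raw_value: int) -> str:
--     candidates = []
--     for offset in (44, 104):
--         if raw_value >= offset and (raw_value - offset) % 4 == 0:
--             candidates.append((offset, (raw_value - offset) // 4))
--
--     if len(candidates) == 1:
--         offset, user_no = candidates[0]
--         return f"User {user_no} (offset {offset})"
--     if len(candidates) > 1:
--         preferred = next((c for c in candidates if c[0] == 44), candidates[0])
--         alternate = [c for c in candidates if c != preferred]
--         offset, user_no = preferred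
--         if alternate:
--             alt_text = ", ".join(f"User {user_no} (offset {offset})" for offset, user_no in alternate)
--             return f"User {user_no} (offset {offset}; alt {alt_text})"
--         return f"User {user_no} (offset {offset})"
--     return f"raw {raw_value}"
-- ===== SOURCE B (Python) =====
-- def format_user_number(raw_value: int) -> str:
--     if raw_value >= 44 and (raw_value - 44) % 4 == 0:
--         user = (raw_value - 44) // 4
--         if raw_value >= 104:
--             return f"User {user} (offset 44; alt User {(raw_value - 104) // 4} (offset 104))"
--         return f"User {user} (offset 44)"
--     return f"raw {raw_value}"
-- ===== Notes on version B (the rewrite author's own statement) =====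
-- stated objective: simpler
-- what changed: Replaces the candidate-list accumulation and length dispatch with direct threshold branching: the gap between the two offsets is a multiple of the step, so both divisibility tests coincide and B checks the lower threshold and divisibility once, then formats the result in closed form.
import Mathlib
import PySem

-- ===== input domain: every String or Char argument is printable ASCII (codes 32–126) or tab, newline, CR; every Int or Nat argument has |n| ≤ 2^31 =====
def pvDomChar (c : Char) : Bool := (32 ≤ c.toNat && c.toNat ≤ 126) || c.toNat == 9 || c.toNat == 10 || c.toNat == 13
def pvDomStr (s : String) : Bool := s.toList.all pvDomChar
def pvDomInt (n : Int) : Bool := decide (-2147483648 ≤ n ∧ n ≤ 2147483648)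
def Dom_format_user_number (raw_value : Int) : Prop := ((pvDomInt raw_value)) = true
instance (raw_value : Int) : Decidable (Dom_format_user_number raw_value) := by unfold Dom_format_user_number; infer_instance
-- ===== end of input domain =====

-- B replaces A's candidate-list building and length dispatch with direct threshold
-- branching in closed form (objective: simpler); same return value everywhere.

-- ===== PORT A =====
-- literal transliteration: build candidates by folding over the offset tuple, then dispatch on length
def format_user_number (raw_value : Int) : String :=
  let candidates : List (Int × Int) :=
    [(44 : Int), 104].foldl (fun acc offset =>
      if raw_value ≥ offset ∧ PySem.Int.mod (raw_value - offset) 4 = 0 then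
        acc ++ [(offset, PySem.Int.floordiv (raw_value - offset) 4)]
      else acc) []
  if candidates.length = 1 then
    match candidates.head? with
    | some (offset, user_no) =>
        "User " ++ PySem.Int.toStr user_no ++ " (offset " ++ PySem.Int.toStr offset ++ ")"
    | none => ""  -- unreachable under length = 1
  else if candidates.length > 1 then
    let preferred := (candidates.find? (fun c => c.1 = 44)).getD (candidates.headD (0, 0))
    let alternate := candidates.filter (fun c => c ≠ preferred)
    let offset := preferred.1
    let user_no := preferred.2
    if alternate ≠ [] then
      let alt_text := String.intercalate ", "
        (alternate.map (fun c => "User " ++ PySem.Int.toStr c.2 ++ " (offset " ++ PySem.Int.toStr c.1 ++ ")"))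
      "User " ++ PySem.Int.toStr user_no ++ " (offset " ++ PySem.Int.toStr offset ++ "; alt " ++ alt_text ++ ")"
    else
      "User " ++ PySem.Int.toStr user_no ++ " (offset " ++ PySem.Int.toStr offset ++ ")"
  else
    "raw " ++ PySem.Int.toStr raw_value

-- ===== PORT B =====
def format_user_number_alt (raw_value : Int) : String :=
  if raw_value ≥ 44 ∧ PySem.Int.mod (raw_value - 44) 4 = 0 then
    let user := PySem.Int.floordiv (raw_value - 44) 4
    if raw_value ≥ 104 then
      "User " ++ PySem.Int.toStr user ++ " (offset 44; alt User " ++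
        PySem.Int.toStr (PySem.Int.floordiv (raw_value - 104) 4) ++ " (offset 104))"
    else
      "User " ++ PySem.Int.toStr user ++ " (offset 44)"
  else
    "raw " ++ PySem.Int.toStr raw_value

-- ===== PRECONDITION & SPEC =====
def Spec_format_user_number (raw_value : Int) (out : String) : Prop := out = format_user_number_alt raw_value
instance (raw_value : Int) (out : String) : Decidable (Spec_format_user_number raw_value out) := by unfold Spec_format_user_number; infer_instance

-- ===== CLAIM (what is proved, stated in full; the proofs are below) =====
def Claim_equal_format_user_number : Prop := ∀ (raw_value : Int), Dom_format_user_number raw_value → Spec_format_user_number raw_value (format_user_number raw_value)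

-- ===== LEMMAS AND PROOFS =====

theorem intercalate_singleton (s : String) : String.intercalate ", " [s] = s := rfl

-- ===== VERDICT (by name: the statement is the Claim_ definition above) =====
theorem format_user_number_spec : Claim_equal_format_user_number := by
  intro r _
  unfold Spec_format_user_number format_user_number format_user_number_alt
  by_cases h44 : (4 : Int) ∣ r - 44
  · have h104 : (4 : Int) ∣ r - 104 := by omega
    by_cases hge104 : r ≥ 104
    · have hge44 : (44 : Int) ≤ r := by omega
      have hge104' : (104 : Int) ≤ r := hge104
      simp [h44, h104, hge44, hge104', List.foldl, intercalate_singleton,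
        show PySem.Int.toStr (44 : Int) = "44" from by decide,
        show PySem.Int.toStr (104 : Int) = "104" from by decide,
        String.append_assoc]
      rfl
    · by_cases hge44 : r ≥ 44
      · have hge44' : (44 : Int) ≤ r := hge44
        simp [h44, hge44', hge104, List.foldl, String.append_assoc,
          show PySem.Int.toStr (44 : Int) = "44" from by decide]
      · simp [hge44, hge104, List.foldl]
  · have h104 : ¬ (4 : Int) ∣ r - 104 := by omega
    simp [h44, h104, List.foldl]
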